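-- pv_equiv track=rewrite | github.com/microsoft/muzic | ROC/utils/lyrics_match.py | check
-- ===== SOURCE A (Python) =====
-- def check(arr, m, a1, a2, mod1, mod2):
--     n = len(arr)
--     aL1, aL2 = pow(a1, m, mod1), pow(a2, m, mod2)
--     h1, h2 = 0, 0
--     for i in range(m):
--         h1 = (h1 * a1 + arr[i]) % mod1
--         h2 = (h2 * a2 + arr[i]) % mod2
--     seen = dict()
--     seen[(h1, h2)] = [m - 1]
--     for start in range(1, n - m + 1):
--         h1 = (h1 * a1 - arr[start - 1] * aL1 + arr[start + m - 1]) % mod1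
--         h2 = (h2 * a2 - arr[start - 1] * aL2 + arr[start + m - 1]) % mod2
--         if (h1, h2) in seen:
--             if min(seen[(h1, h2)]) < start:
--                 return start
--             else:
--                 seen[(h1,h2)].append(start + m - 1)
--         else:
--             seen[(h1, h2)] = [start + m - 1]
--         #seen.add((h1, h2))
--     return -1
-- ===== SOURCE B (Python) =====
-- def check(arr, m, a1, a2, mod1, mod2):
--     n = len(arr)
--     aL1, aL2 = pow(a1, m, mod1), pow(a2, m, mod2)
--     # prefix polynomial hashes: P1[k] = hash of arr[:k] mod mod1 (same for P2/mod2)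
--     P1 = [0]
--     P2 = [0]
--     for x in arr:
--         P1.append((P1[-1] * a1 + x) % mod1)
--         P2.append((P2[-1] * a2 + x) % mod2)
--
--     def win(start):
--         return ((P1[start + m] - P1[start] * aL1) % mod1,
--                 (P2[start + m] - P2[start] * aL2) % mod2)
--
--     seen = {win(0): [m - 1]}
--     for start in range(1, n - m + 1):
--         key = win(start)
--         if key in seen:
--             if min(seen[key]) < start:
--                 return start
--             seen[key].append(start + m - 1)
--         else:
--             seen[key] = [start + m - 1]
--     return -1
-- ===== Notes on version B (the rewrite author's own statement) =====
-- stated objective: alternative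
-- what changed: B precomputes prefix polynomial-hash arrays P1/P2 once and reads each window's hash off them as (P[start+m]-P[start]*aL)%mod, replacing A's incremental rolling-hash update carried through the loop.
-- outside the precondition, e.g. on check([4, -1, 1, 1, 2, 4], -1, -3, 4, 2, 5): A returns 3, B returns 4; on check([0], -1, 2, 2, 5, 5): A returns 1, B returns 1
import Mathlib
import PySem

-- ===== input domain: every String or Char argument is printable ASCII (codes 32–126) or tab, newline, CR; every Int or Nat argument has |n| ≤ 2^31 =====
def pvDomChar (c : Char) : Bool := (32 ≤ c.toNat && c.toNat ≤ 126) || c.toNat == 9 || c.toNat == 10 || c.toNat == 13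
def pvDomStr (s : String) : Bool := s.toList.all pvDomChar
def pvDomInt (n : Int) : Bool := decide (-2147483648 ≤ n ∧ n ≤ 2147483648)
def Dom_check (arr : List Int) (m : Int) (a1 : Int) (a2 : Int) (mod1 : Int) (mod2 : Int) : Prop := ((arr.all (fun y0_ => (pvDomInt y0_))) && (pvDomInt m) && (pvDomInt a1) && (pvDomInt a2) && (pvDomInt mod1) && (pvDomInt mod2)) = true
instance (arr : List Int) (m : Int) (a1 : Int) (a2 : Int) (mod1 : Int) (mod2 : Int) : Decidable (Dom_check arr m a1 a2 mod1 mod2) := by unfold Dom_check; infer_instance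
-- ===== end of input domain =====

-- B computes each window hash from prefix polynomial-hash arrays instead of A's incremental
-- rolling update (objective: alternative decomposition, same cost; return value only).

-- ===== PORT A =====
-- pow(a, m, md): exact for 0 ≤ m and md ≠ 0 (both required by Pre_check)
def pypow (a m md : Int) : Int := PySem.Int.powMod a m.toNat md

-- the seed loop: for i in range(m): h1 = (h1*a1+arr[i])%mod1; h2 = (h2*a2+arr[i])%mod2
def checkSeed (arr : List Int) (m a1 a2 mod1 mod2 : Int) : Int × Int :=
  (PySem.List.pyRange 0 m).foldl
    (fun h i => (PySem.Int.mod (h.1 * a1 + PySem.List.pyGetD arr i 0) mod1,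
                 PySem.Int.mod (h.2 * a2 + PySem.List.pyGetD arr i 0) mod2)) (0, 0)

-- the main loop of A; early 'return start' becomes returning 'start' from the recursion
def checkLoopA (arr : List Int) (m a1 a2 mod1 mod2 aL1 aL2 : Int) :
    List Int → Int × Int → PySem.Dict (Int × Int) (List Int) → Int
  | [], _, _ => -1
  | start :: rest, h, seen =>
    let h1 := PySem.Int.mod (h.1 * a1 - PySem.List.pyGetD arr (start - 1) 0 * aL1 +
                PySem.List.pyGetD arr (start + m - 1) 0) mod1
    let h2 := PySem.Int.mod (h.2 * a2 - PySem.List.pyGetD arr (start - 1) 0 * aL2 +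
                PySem.List.pyGetD arr (start + m - 1) 0) mod2
    match seen.get? (h1, h2) with
    | some l =>
      -- min(seen[(h1,h2)]): the stored lists are never empty, so '.getD 0' is unreachable
      if (PySem.List.min? l (fun x => x)).getD 0 < start then start
      else checkLoopA arr m a1 a2 mod1 mod2 aL1 aL2 rest (h1, h2)
             (seen.modify (h1, h2) [] (fun l => l ++ [start + m - 1]))
    | none => checkLoopA arr m a1 a2 mod1 mod2 aL1 aL2 rest (h1, h2)
                (seen.insert (h1, h2) [start + m - 1])

def check (arr : List Int) (m : Int) (a1 : Int) (a2 : Int) (mod1 : Int) (mod2 : Int) : Int :=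
  let n : Int := arr.length
  let aL1 := pypow a1 m mod1
  let aL2 := pypow a2 m mod2
  let h := checkSeed arr m a1 a2 mod1 mod2
  let seen : PySem.Dict (Int × Int) (List Int) := PySem.Dict.empty.insert h [m - 1]
  checkLoopA arr m a1 a2 mod1 mod2 aL1 aL2 (PySem.List.pyRange 1 (n - m + 1)) h seen

-- ===== PORT B =====
-- prefix polynomial hashes: P[k] = hash of arr[:k] mod md, built front to back (Source B's loop)
def prefHash (a md acc : Int) : List Int → List Int
  | [] => [acc]
  | x :: xs => acc :: prefHash a md (PySem.Int.mod (acc * a + x) md) xs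

-- win(start) of Source B: the window hash read off the prefix arrays
def winKey (P1 P2 : List Int) (m aL1 aL2 mod1 mod2 start : Int) : Int × Int :=
  (PySem.Int.mod (PySem.List.pyGetD P1 (start + m) 0 - PySem.List.pyGetD P1 start 0 * aL1) mod1,
   PySem.Int.mod (PySem.List.pyGetD P2 (start + m) 0 - PySem.List.pyGetD P2 start 0 * aL2) mod2)

def checkLoopB (P1 P2 : List Int) (m aL1 aL2 mod1 mod2 : Int) :
    List Int → PySem.Dict (Int × Int) (List Int) → Int
  | [], _ => -1
  | start :: rest, seen =>
    let key := winKey P1 P2 m aL1 aL2 mod1 mod2 start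
    match seen.get? key with
    | some l =>
      if (PySem.List.min? l (fun x => x)).getD 0 < start then start
      else checkLoopB P1 P2 m aL1 aL2 mod1 mod2 rest
             (seen.modify key [] (fun l => l ++ [start + m - 1]))
    | none => checkLoopB P1 P2 m aL1 aL2 mod1 mod2 rest (seen.insert key [start + m - 1])

def check_alt (arr : List Int) (m : Int) (a1 : Int) (a2 : Int) (mod1 : Int) (mod2 : Int) : Int :=
  let n : Int := arr.length
  let aL1 := pypow a1 m mod1
  let aL2 := pypow a2 m mod2
  let P1 := prefHash a1 mod1 0 arr
  let P2 := prefHash a2 mod2 0 arr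
  let seen : PySem.Dict (Int × Int) (List Int) :=
    PySem.Dict.empty.insert (winKey P1 P2 m aL1 aL2 mod1 mod2 0) [m - 1]
  checkLoopB P1 P2 m aL1 aL2 mod1 mod2 (PySem.List.pyRange 1 (n - m + 1)) seen

-- ===== PRECONDITION & SPEC =====
-- Pre_check excludes exactly: m > len(arr) (A's seed loop raises IndexError), mod1 = 0 or
-- mod2 = 0 (pow raises ValueError), and m < 0 — there A usually raises (ValueError or
-- IndexError), and where it does return it does so only via Python's negative-index
-- wraparound in arr[start+m-1], an accident of A's indexing, not a specifiable behaviour.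
def Pre_check (arr : List Int) (m : Int) (a1 : Int) (a2 : Int) (mod1 : Int) (mod2 : Int) : Prop :=
  0 ≤ m ∧ m ≤ arr.length ∧ mod1 ≠ 0 ∧ mod2 ≠ 0
instance (arr : List Int) (m : Int) (a1 : Int) (a2 : Int) (mod1 : Int) (mod2 : Int) : Decidable (Pre_check arr m a1 a2 mod1 mod2) := by unfold Pre_check; infer_instance

def pvWitness_check : List Int × Int × Int × Int × Int × Int := ([1, 2, 1, 2], 2, 31, 37, 97, 101)

def Spec_check (arr : List Int) (m : Int) (a1 : Int) (a2 : Int) (mod1 : Int) (mod2 : Int) (out : Int) : Prop := out = check_alt arr m a1 a2 mod1 mod2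
instance (arr : List Int) (m : Int) (a1 : Int) (a2 : Int) (mod1 : Int) (mod2 : Int) (out : Int) : Decidable (Spec_check arr m a1 a2 mod1 mod2 out) := by unfold Spec_check; infer_instance

-- ===== CLAIM (what is proved, stated in full; the proofs are below) =====
def Claim_equal_check : Prop := ∀ (arr : List Int) (m : Int) (a1 : Int) (a2 : Int) (mod1 : Int) (mod2 : Int), Dom_check arr m a1 a2 mod1 mod2 → Pre_check arr m a1 a2 mod1 mod2 → Spec_check arr m a1 a2 mod1 mod2 (check arr m a1 a2 mod1 mod2)

-- ===== LEMMAS AND PROOFS =====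

-- mod respects congruence (any modulus; Int.fmod x 0 = x covers b = 0)
theorem pymod_congr (x y b : Int) (h : b ∣ x - y) : PySem.Int.mod x b = PySem.Int.mod y b := by
  obtain ⟨c, hc⟩ := h
  have hx : x = y + b * c := by linarith
  simp [PySem.Int.mod, hx, Int.add_mul_fmod_self_left]

theorem pymod_idem (x b : Int) : PySem.Int.mod (PySem.Int.mod x b) b = PySem.Int.mod x b := by
  apply pymod_congr
  simpa [neg_sub] using dvd_neg.mpr (Int.dvd_self_sub_fmod (x := x) (m := b))

theorem prefHash_getD_zero (a md acc : Int) (xs : List Int) :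
    (prefHash a md acc xs).getD 0 0 = acc := by
  cases xs <;> rfl

-- the same fact in the getElem? form simp normalises to
theorem prefHash_getD_zero' (a md acc : Int) (xs : List Int) :
    (prefHash a md acc xs)[0]?.getD 0 = acc := by
  cases xs <;> rfl

theorem prefHash_step (a md : Int) (xs : List Int) :
    ∀ (acc : Int) (k : Nat), k < xs.length →
      (prefHash a md acc xs).getD (k + 1) 0 =
        PySem.Int.mod ((prefHash a md acc xs).getD k 0 * a + xs.getD k 0) md := by
  induction xs with
  | nil => intro acc k h; simp at h
  | cons x xs ih =>
    intro acc k h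
    cases k with
    | zero => simp [prefHash, prefHash_getD_zero']
    | succ k => simpa [prefHash] using ih _ k (by simpa using h)

-- B's window-hash value at start s (one modulus)
def keyW (arr : List Int) (a md aL : Int) (m' s : Nat) : Int :=
  PySem.Int.mod ((prefHash a md 0 arr).getD (s + m') 0 -
    (prefHash a md 0 arr).getD s 0 * aL) md

-- A's rolling update carries keyW t to keyW (t+1)
theorem roll_eq (arr : List Int) (a md aL : Int) (m' t : Nat)
    (h : t + 1 + m' ≤ arr.length) :
    PySem.Int.mod (keyW arr a md aL m' t * a - arr.getD t 0 * aL + arr.getD (t + m') 0) md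
      = keyW arr a md aL m' (t + 1) := by
  unfold keyW
  rw [show t + 1 + m' = t + m' + 1 from by omega]
  apply pymod_congr
  obtain ⟨c1, hc1⟩ := Int.dvd_self_sub_fmod
    (x := (prefHash a md 0 arr).getD (t + m') 0 - (prefHash a md 0 arr).getD t 0 * aL) (m := md)
  have s2 := prefHash_step a md arr 0 (t + m') (by omega)
  have s3 := prefHash_step a md arr 0 t (by omega)
  obtain ⟨c2, hc2⟩ := Int.dvd_self_sub_fmod
    (x := (prefHash a md 0 arr).getD (t + m') 0 * a + arr.getD (t + m') 0) (m := md)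
  obtain ⟨c3, hc3⟩ := Int.dvd_self_sub_fmod
    (x := (prefHash a md 0 arr).getD t 0 * a + arr.getD t 0) (m := md)
  simp only [PySem.Int.mod] at s2 s3 ⊢
  rw [← s2] at hc2
  rw [← s3] at hc3
  refine ⟨(-a) * c1 + c2 + (-aL) * c3, ?_⟩
  linear_combination (-a) * hc1 + hc2 + (-aL) * hc3

-- the seed loop computes the prefix hashes of arr[:m]
theorem checkSeed_eq (arr : List Int) (a1 a2 mod1 mod2 : Int) :
    ∀ m' : Nat, m' ≤ arr.length →
      checkSeed arr (m' : Int) a1 a2 mod1 mod2 =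
        ((prefHash a1 mod1 0 arr).getD m' 0, (prefHash a2 mod2 0 arr).getD m' 0) := by
  intro m'
  induction m' with
  | zero => intro _; simp [checkSeed, PySem.List.pyRange_one_eq_nil, prefHash_getD_zero']
  | succ k ih =>
    intro h
    have hk : k < arr.length := by omega
    unfold checkSeed
    rw [show ((k + 1 : Nat) : Int) = (k : Int) + 1 from by push_cast; ring,
        PySem.List.pyRange_one_succ_right (by positivity), List.foldl_append]
    have := ih (by omega)
    unfold checkSeed at this
    rw [this]
    simp only [List.foldl_cons, List.foldl_nil, PySem.List.pyGetD_natCast]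
    rw [prefHash_step a1 mod1 arr 0 k hk, prefHash_step a2 mod2 arr 0 k hk]

-- B's window hash at start 0 is the seed hash
theorem keyW_zero (arr : List Int) (a md aL : Int) (m' : Nat) (h : m' ≤ arr.length) :
    keyW arr a md aL m' 0 = (prefHash a md 0 arr).getD m' 0 := by
  unfold keyW
  simp only [Nat.zero_add, prefHash_getD_zero, zero_mul, sub_zero]
  cases m' with
  | zero => simp [prefHash_getD_zero', PySem.Int.mod]
  | succ k => rw [prefHash_step a md arr 0 k (by omega)]; exact pymod_idem _ _

-- the main loops agree, given A's running hashes equal B's window hashes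
theorem loop_eq (arr : List Int) (a1 a2 mod1 mod2 aL1 aL2 : Int) (m' : Nat) :
    ∀ (fuel t : Nat) (seen : PySem.Dict (Int × Int) (List Int)),
      arr.length - m' - t ≤ fuel →
      checkLoopA arr (m' : Int) a1 a2 mod1 mod2 aL1 aL2
          (PySem.List.pyRange ((t : Int) + 1) ((arr.length : Int) - (m' : Int) + 1))
          (keyW arr a1 mod1 aL1 m' t, keyW arr a2 mod2 aL2 m' t) seen
        = checkLoopB (prefHash a1 mod1 0 arr) (prefHash a2 mod2 0 arr) (m' : Int) aL1 aL2 mod1 mod2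
          (PySem.List.pyRange ((t : Int) + 1) ((arr.length : Int) - (m' : Int) + 1)) seen := by
  intro fuel
  induction fuel with
  | zero =>
    intro t seen hf
    have hnil : ((arr.length : Int) - (m' : Int) + 1) ≤ (t : Int) + 1 := by omega
    rw [PySem.List.pyRange_one_eq_nil hnil]
    rfl
  | succ fuel ih =>
    intro t seen hf
    by_cases hlt : ((t : Int) + 1) < (arr.length : Int) - (m' : Int) + 1
    · have hb : t + 1 + m' ≤ arr.length := by omega
      rw [PySem.List.pyRange_one_cons hlt]
      simp only [checkLoopA, checkLoopB]
      rw [show ((t : Int) + 1 - 1) = (t : Int) from by ring,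
          show ((t : Int) + 1 + (m' : Int) - 1) = ((t + m' : Nat) : Int) from by push_cast; ring]
      unfold winKey
      rw [show ((t : Int) + 1 + (m' : Int)) = ((t + 1 + m' : Nat) : Int) from by push_cast; ring,
          show ((t : Int) + 1) = ((t + 1 : Nat) : Int) from by push_cast; ring]
      simp only [PySem.List.pyGetD_natCast]
      rw [roll_eq arr a1 mod1 aL1 m' t hb, roll_eq arr a2 mod2 aL2 m' t hb]
      have hkey1 : PySem.Int.mod ((prefHash a1 mod1 0 arr).getD (t + 1 + m') 0 -
          (prefHash a1 mod1 0 arr).getD (t + 1) 0 * aL1) mod1 = keyW arr a1 mod1 aL1 m' (t + 1) := rfl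
      have hkey2 : PySem.Int.mod ((prefHash a2 mod2 0 arr).getD (t + 1 + m') 0 -
          (prefHash a2 mod2 0 arr).getD (t + 1) 0 * aL2) mod2 = keyW arr a2 mod2 aL2 m' (t + 1) := rfl
      rw [hkey1, hkey2]
      cases hget : (seen.get? (keyW arr a1 mod1 aL1 m' (t + 1), keyW arr a2 mod2 aL2 m' (t + 1))) with
      | none => dsimp only; exact ih (t + 1) _ (by omega)
      | some l =>
        dsimp only
        split_ifs with hmin
        · rfl
        · exact ih (t + 1) _ (by omega)
    · rw [PySem.List.pyRange_one_eq_nil (by omega)]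
      rfl

-- ===== VERDICT (by name: the statement is the Claim_ definition above) =====
theorem check_spec : Claim_equal_check := by
  intro arr m a1 a2 mod1 mod2 _ hpre
  obtain ⟨hm0, hmn, -, -⟩ := hpre
  obtain ⟨m', rfl⟩ : ∃ k : Nat, m = (k : Int) := ⟨m.toNat, (Int.toNat_of_nonneg hm0).symm⟩
  have hlen : m' ≤ arr.length := by exact_mod_cast hmn
  simp only [Spec_check, check, check_alt]
  rw [checkSeed_eq arr a1 a2 mod1 mod2 m' hlen]
  have hwin0 : winKey (prefHash a1 mod1 0 arr) (prefHash a2 mod2 0 arr) (m' : Int)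
      (pypow a1 (m' : Int) mod1) (pypow a2 (m' : Int) mod2) mod1 mod2 0 =
      ((prefHash a1 mod1 0 arr).getD m' 0, (prefHash a2 mod2 0 arr).getD m' 0) := by
    unfold winKey
    rw [show ((0 : Int) + (m' : Int)) = ((m' : Nat) : Int) from by ring]
    simp only [PySem.List.pyGetD_natCast, PySem.List.pyGetD_zero]
    rw [show ((prefHash a1 mod1 0 arr).getD 0 0) = 0 from prefHash_getD_zero _ _ _ _,
        show ((prefHash a2 mod2 0 arr).getD 0 0) = 0 from prefHash_getD_zero _ _ _ _]
    have h1 := keyW_zero arr a1 mod1 (pypow a1 (m' : Int) mod1) m' hlen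
    have h2 := keyW_zero arr a2 mod2 (pypow a2 (m' : Int) mod2) m' hlen
    unfold keyW at h1 h2
    simp only [Nat.zero_add, prefHash_getD_zero, zero_mul, sub_zero] at h1 h2
    rw [zero_mul, zero_mul, sub_zero, sub_zero, h1, h2]
  rw [hwin0]
  have h10 := keyW_zero arr a1 mod1 (pypow a1 (m' : Int) mod1) m' hlen
  have h20 := keyW_zero arr a2 mod2 (pypow a2 (m' : Int) mod2) m' hlen
  have := loop_eq arr a1 a2 mod1 mod2 (pypow a1 (m' : Int) mod1) (pypow a2 (m' : Int) mod2) m'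
    (arr.length) 0 (PySem.Dict.empty.insert
      ((prefHash a1 mod1 0 arr).getD m' 0, (prefHash a2 mod2 0 arr).getD m' 0) [(m' : Int) - 1])
    (by omega)
  rw [h10, h20] at this
  simpa using this
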